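-- pv_equiv track=rewrite | github.com/EkaterinaGaraeva/python_homework4_2 | task002.py | list_of_simple_multipliers2
-- ===== SOURCE A (Python) =====
-- def list_of_simple_multipliers2(n):
--     simple_multipliers = []
--     for i in range(2, n):
--         if not int(n % i):
--             count = 0
--             for k in range(2, i):
--                 if not int(i % k):
--                     count += 1
--                     if count > 0:
--                         break
--             if count == 0:
--                 if i not in simple_multipliers:
--                     simple_multipliers.append(i)
--     return simple_multipliers
-- ===== SOURCE B (Python) =====
-- def list_of_simple_multipliers2(n):
--     res = []
--     m = n
--     i = 2
--     while i <= m: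
--         if m % i == 0:
--             if i != n:
--                 res.append(i)
--             while m % i == 0:
--                 m //= i
--         i += 1
--     return res
-- ===== Notes on version B (the rewrite author's own statement) =====
-- stated objective: faster
-- what changed: B replaces A's quadratic scheme (for every i < n, test divisibility of n and re-test i's primality by an inner trial loop) with a single factorisation sweep that divides each found factor out of a shrinking cofactor, so found divisors are automatically prime and distinct and the loop stops at the largest prime factor.
import Mathlib
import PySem

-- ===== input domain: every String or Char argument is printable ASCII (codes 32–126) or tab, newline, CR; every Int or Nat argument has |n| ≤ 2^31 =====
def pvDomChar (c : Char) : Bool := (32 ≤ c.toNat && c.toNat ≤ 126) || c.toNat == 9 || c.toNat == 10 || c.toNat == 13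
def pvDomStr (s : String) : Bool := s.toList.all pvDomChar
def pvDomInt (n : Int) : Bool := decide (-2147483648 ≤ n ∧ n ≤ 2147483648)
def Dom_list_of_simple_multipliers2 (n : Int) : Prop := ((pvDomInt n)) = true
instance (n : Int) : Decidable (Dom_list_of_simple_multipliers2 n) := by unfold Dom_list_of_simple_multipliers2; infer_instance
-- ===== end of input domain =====

-- B: one factorising sweep with a shrinking cofactor instead of A's per-candidate primality re-test; measurably faster.


-- ===== PORT A =====
-- inner loop 'for k in range(2, i): if not int(i % k): count += 1; if count > 0: break'
def pvInnerCount : List Int → Int → Int → Int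
  | [], _, count => count
  | k :: ks, i, count =>
    if PySem.Int.mod i k = 0 then
      if count + 1 > 0 then count + 1 else pvInnerCount ks i (count + 1)
    else pvInnerCount ks i count

def list_of_simple_multipliers2 (n : Int) : List Int :=
  (PySem.List.pyRange 2 n 1).foldl (fun acc i =>
    if PySem.Int.mod n i = 0 then
      let count := pvInnerCount (PySem.List.pyRange 2 i 1) i 0
      if count = 0 then
        if i ∈ acc then acc else acc ++ [i]
      else acc
    else acc) []

-- ===== PORT B =====
-- 'while m % i == 0: m //= i', run as structural recursion on the measure m.toNat
-- (the fuel only bounds the iteration count; with fuel = m.toNat the loop runs exactly as Python's).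
def pvDivOut (i : Int) : Nat → Int → Int
  | 0, m => m
  | fuel + 1, m =>
    if 2 ≤ i ∧ 1 ≤ m ∧ PySem.Int.mod m i = 0 then pvDivOut i fuel (PySem.Int.floordiv m i) else m

-- 'while i <= m: if m % i == 0: (if i != n: append i); divide i out; i += 1',
-- structural recursion on the measure (m + 1 - i).toNat (when the fuel is 0 the guard i ≤ m is false anyway).
def pvTrialGo (n : Int) : Nat → Int → Int → List Int → List Int
  | 0, _, _, acc => acc
  | fuel + 1, i, m, acc =>
    if i ≤ m then
      if PySem.Int.mod m i = 0 then
        pvTrialGo n fuel (i + 1) (pvDivOut i m.toNat m) (if i ≠ n then acc ++ [i] else acc)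
      else pvTrialGo n fuel (i + 1) m acc
    else acc

def list_of_simple_multipliers2_alt (n : Int) : List Int := pvTrialGo n (n + 1 - 2).toNat 2 n []

-- ===== PRECONDITION & SPEC =====
def Spec_list_of_simple_multipliers2 (n : Int) (out : List Int) : Prop := out = list_of_simple_multipliers2_alt n
instance (n : Int) (out : List Int) : Decidable (Spec_list_of_simple_multipliers2 n out) := by unfold Spec_list_of_simple_multipliers2; infer_instance

-- ===== CLAIM (what is proved, stated in full; the proofs are below) =====
def Claim_equal_list_of_simple_multipliers2 : Prop := ∀ (n : Int), Dom_list_of_simple_multipliers2 n → Spec_list_of_simple_multipliers2 n (list_of_simple_multipliers2 n)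

-- ===== LEMMAS AND PROOFS =====

-- the common characterisation: primes dividing m, listed in increasing order
def pvPF (m : Int) : Int → Bool := fun p => decide (Prime p ∧ p ∣ m)

theorem pvInner_eq_zero_iff (i : Int) (l : List Int) :
    pvInnerCount l i 0 = 0 ↔ ∀ k ∈ l, ¬ (PySem.Int.mod i k = 0) := by
  induction l with
  | nil => simp [pvInnerCount]
  | cons k ks ih =>
    by_cases h : PySem.Int.mod i k = 0
    · simp [pvInnerCount, h]
    · simp [pvInnerCount, h, ih]

theorem pv_prime_iff_no_div (i : Int) (h2 : 2 ≤ i) :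
    (∀ k : Int, 2 ≤ k → k < i → ¬ k ∣ i) ↔ Prime i := by
  rw [Int.prime_iff_natAbs_prime, Nat.prime_def_lt]
  constructor
  · intro h
    refine ⟨by omega, ?_⟩
    intro m hm hdvd
    by_contra hne
    have hm0 : m ≠ 0 := by
      rintro rfl
      have : i.natAbs = 0 := Nat.eq_zero_of_zero_dvd hdvd
      omega
    have hm2 : 2 ≤ m := by omega
    have hk : ((m : Int)) ∣ i := by
      have : (m : Int) ∣ (i.natAbs : Int) := Int.natCast_dvd_natCast.mpr hdvd
      rwa [Int.natAbs_of_nonneg (by omega)] at this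
    exact h (m : Int) (by exact_mod_cast hm2) (by omega) hk
  · intro ⟨_, h⟩ k hk2 hki hdvd
    have h1 : k.natAbs ∣ i.natAbs := Int.natAbs_dvd_natAbs.mpr hdvd
    have h2' : k.natAbs < i.natAbs := by omega
    have := h k.natAbs h2' h1
    omega

theorem pv_small_prime (i m : Int) (h2 : 2 ≤ i) (hd : i ∣ m) (h1 : 1 ≤ m)
    (hmin : ∀ p : Int, Prime p → 0 < p → p ∣ m → i ≤ p) : Prime i := by
  have hne1 : i.natAbs ≠ 1 := by omega
  have hq : Nat.Prime i.natAbs.minFac := Nat.minFac_prime hne1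
  have hqp : Prime ((i.natAbs.minFac : Int)) := Int.prime_iff_natAbs_prime.mpr (by simpa using hq)
  have hqd : ((i.natAbs.minFac : Int)) ∣ i := by
    have : (i.natAbs.minFac : Int) ∣ (i.natAbs : Int) := Int.natCast_dvd_natCast.mpr (Nat.minFac_dvd _)
    rwa [Int.natAbs_of_nonneg (by omega)] at this
  have hle : i ≤ (i.natAbs.minFac : Int) :=
    hmin _ hqp (by exact_mod_cast hq.pos) (hqd.trans hd)
  have hge : i.natAbs.minFac ≤ i.natAbs := Nat.minFac_le (by omega)
  have : (i.natAbs.minFac : Int) = i := by omega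
  rwa [← this]

theorem pv_ediv_lt (i m : Int) (h2 : 2 ≤ i) (h1 : 1 ≤ m) : 0 ≤ m / i ∧ m / i < m := by
  have h0 : i ≠ 0 := by omega
  have hq : 0 ≤ m / i := Int.ediv_nonneg (by omega) (by omega)
  have heq := Int.ediv_add_emod m i
  have hm := Int.emod_nonneg m h0
  refine ⟨hq, ?_⟩
  by_contra hlt
  have hlt' : m ≤ m / i := le_of_not_gt hlt
  have h3 : 2 * (m / i) ≤ i * (m / i) := mul_le_mul_of_nonneg_right (by omega) hq
  linarith

theorem pv_floordiv_ge_one (i m : Int) (h2 : 2 ≤ i) (h1 : 1 ≤ m) (hd : i ∣ m) :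
    1 ≤ PySem.Int.floordiv m i := by
  have hpos : (0:Int) < i := by omega
  have him : i ≤ m := Int.le_of_dvd (by omega) hd
  exact (PySem.Int.le_floordiv_iff_mul_le (a := m) (b := i) (q := 1) hpos).mpr (by omega)

theorem pvDivOut_le (i : Int) : ∀ (fuel : Nat) (m : Int), pvDivOut i fuel m ≤ m := by
  intro fuel
  induction fuel with
  | zero => intro m; simp [pvDivOut]
  | succ fuel ih =>
    intro m
    by_cases h : 2 ≤ i ∧ 1 ≤ m ∧ PySem.Int.mod m i = 0
    · have hpos : (0:Int) < i := by omega
      have hfe : PySem.Int.floordiv m i = m / i := PySem.Int.floordiv_eq_ediv_of_pos hpos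
      have hlt := pv_ediv_lt i m h.1 h.2.1
      have := ih (PySem.Int.floordiv m i)
      simp only [pvDivOut, if_pos h]
      omega
    · simp [pvDivOut, if_neg h]

theorem pvDivOut_pos (i : Int) : ∀ (fuel : Nat) (m : Int), 1 ≤ m → 1 ≤ pvDivOut i fuel m := by
  intro fuel
  induction fuel with
  | zero => intro m h1; simpa [pvDivOut] using h1
  | succ fuel ih =>
    intro m h1
    by_cases h : 2 ≤ i ∧ 1 ≤ m ∧ PySem.Int.mod m i = 0
    · have hdvd : i ∣ m := (PySem.Int.mod_eq_zero_iff_dvd m i).mp h.2.2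
      simp only [pvDivOut, if_pos h]
      exact ih _ (pv_floordiv_ge_one i m h.1 h.2.1 hdvd)
    · simpa [pvDivOut, if_neg h] using h1

theorem pvDivOut_dvd (i : Int) : ∀ (fuel : Nat) (m : Int), pvDivOut i fuel m ∣ m := by
  intro fuel
  induction fuel with
  | zero => intro m; simp [pvDivOut]
  | succ fuel ih =>
    intro m
    by_cases h : 2 ≤ i ∧ 1 ≤ m ∧ PySem.Int.mod m i = 0
    · have hpos : (0:Int) < i := by omega
      have hdvd : i ∣ m := (PySem.Int.mod_eq_zero_iff_dvd m i).mp h.2.2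
      have hfd : PySem.Int.floordiv m i ∣ m := by
        rw [PySem.Int.floordiv_eq_ediv_of_pos hpos]
        exact ⟨i, (Int.ediv_mul_cancel hdvd).symm⟩
      simp only [pvDivOut, if_pos h]
      exact (ih _).trans hfd
    · simp [pvDivOut, if_neg h]

theorem pvDivOut_not_dvd (i : Int) (h2 : 2 ≤ i) :
    ∀ (fuel : Nat) (m : Int), 1 ≤ m → m.toNat ≤ fuel → ¬ i ∣ pvDivOut i fuel m := by
  intro fuel
  induction fuel with
  | zero => intro m h1 hf; omega
  | succ fuel ih =>
    intro m h1 hf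
    by_cases h : 2 ≤ i ∧ 1 ≤ m ∧ PySem.Int.mod m i = 0
    · have hdvd : i ∣ m := (PySem.Int.mod_eq_zero_iff_dvd m i).mp h.2.2
      have hpos : (0:Int) < i := by omega
      have hfe : PySem.Int.floordiv m i = m / i := PySem.Int.floordiv_eq_ediv_of_pos hpos
      have hlt := pv_ediv_lt i m h2 h1
      have hge := pv_floordiv_ge_one i m h2 h1 hdvd
      simp only [pvDivOut, if_pos h]
      exact ih _ hge (by omega)
    · simp only [pvDivOut, if_neg h]
      intro hdvd
      exact h ⟨h2, h1, (PySem.Int.mod_eq_zero_iff_dvd m i).mpr hdvd⟩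

theorem pvDivOut_dvd_of (i p : Int) (hip : Prime i) (hpp : Prime p) (hne : p ≠ i) (hpos : 0 < p) :
    ∀ (fuel : Nat) (m : Int), p ∣ m → p ∣ pvDivOut i fuel m := by
  intro fuel
  induction fuel with
  | zero => intro m hpm; simpa [pvDivOut] using hpm
  | succ fuel ih =>
    intro m hpm
    by_cases h : 2 ≤ i ∧ 1 ≤ m ∧ PySem.Int.mod m i = 0
    · have hposi : (0:Int) < i := by omega
      have hdvd : i ∣ m := (PySem.Int.mod_eq_zero_iff_dvd m i).mp h.2.2
      simp only [pvDivOut, if_pos h]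
      apply ih
      rw [PySem.Int.floordiv_eq_ediv_of_pos hposi]
      have hm : m = i * (m / i) := (Int.mul_ediv_cancel' hdvd).symm
      rcases hpp.dvd_mul.mp (hm ▸ hpm) with hpi | h'
      · exfalso
        have h1 : p.natAbs ∣ i.natAbs := Int.natAbs_dvd_natAbs.mpr hpi
        have hip' : Nat.Prime i.natAbs := Int.prime_iff_natAbs_prime.mp hip
        have hpp' : Nat.Prime p.natAbs := Int.prime_iff_natAbs_prime.mp hpp
        have h2 : p.natAbs = 1 ∨ p.natAbs = i.natAbs := hip'.eq_one_or_self_of_dvd _ h1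
        have h3 : 2 ≤ p.natAbs := hpp'.two_le
        have h4 : 2 ≤ i := h.1
        exact hne (by omega)
      · exact h'
    · simpa [pvDivOut, if_neg h] using hpm

-- A's fold accumulates exactly the filtered list (the membership test never fires: acc stays below the cursor)
theorem pv_foldA_eq_filter (n : Int) (l acc : List Int)
    (hs : l.Pairwise (· < ·)) (hacc : ∀ a ∈ acc, ∀ b ∈ l, a < b) :
    l.foldl (fun acc i =>
      if PySem.Int.mod n i = 0 then
        let count := pvInnerCount (PySem.List.pyRange 2 i 1) i 0
        if count = 0 then
          if i ∈ acc then acc else acc ++ [i]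
        else acc
      else acc) acc
    = acc ++ l.filter (fun i => decide (PySem.Int.mod n i = 0 ∧ pvInnerCount (PySem.List.pyRange 2 i 1) i 0 = 0)) := by
  induction l generalizing acc with
  | nil => simp
  | cons i t ih =>
    have hmem : i ∉ acc := fun hc => lt_irrefl i (hacc i hc i (by simp))
    have hs' : t.Pairwise (· < ·) := hs.of_cons
    have hit : ∀ b ∈ t, i < b := fun b hb => (List.pairwise_cons.mp hs).1 b hb
    by_cases h1 : PySem.Int.mod n i = 0
    · by_cases h2 : pvInnerCount (PySem.List.pyRange 2 i 1) i 0 = 0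
      · have := ih (acc ++ [i]) hs' (by
          intro a ha b hb
          rcases List.mem_append.mp ha with ha' | ha'
          · exact hacc a ha' b (by simp [hb])
          · simp at ha'; subst ha'; exact hit b hb)
        simp only [List.foldl_cons, h1, h2, if_pos, if_true, hmem, if_neg, if_false, List.filter_cons]
        simp only [h1, h2, and_self, decide_true, if_true]
        simpa using this
      · have := ih acc hs' (fun a ha b hb => hacc a ha b (by simp [hb]))
        simp only [List.foldl_cons, h1, if_true, h2, if_false, List.filter_cons]
        simp only [h1, h2, and_false, decide_false, if_false]
        simpa [h2] using this
    · have := ih acc hs' (fun a ha b hb => hacc a ha b (by simp [hb]))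
      simp only [List.foldl_cons, h1, if_false, List.filter_cons]
      simp only [h1, false_and, decide_false, if_false]
      simpa [h1] using this

theorem pv_A_eq_filter (n : Int) :
    list_of_simple_multipliers2 n = (PySem.List.pyRange 2 n 1).filter (pvPF n) := by
  unfold list_of_simple_multipliers2
  rw [pv_foldA_eq_filter n _ [] (PySem.List.pairwise_lt_pyRange_one 2 n) (by simp)]
  rw [List.nil_append]
  apply List.filter_congr
  intro i hi
  have h2 : 2 ≤ i := ((PySem.List.mem_pyRange_one).mp hi).1
  simp only [pvPF, decide_eq_decide]
  have hdvd : PySem.Int.mod n i = 0 ↔ i ∣ n := PySem.Int.mod_eq_zero_iff_dvd n i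
  have hcnt : pvInnerCount (PySem.List.pyRange 2 i 1) i 0 = 0 ↔ Prime i := by
    rw [pvInner_eq_zero_iff]
    rw [← pv_prime_iff_no_div i h2]
    constructor
    · intro h k hk2 hki hkd
      exact h k (PySem.List.mem_pyRange_one.mpr ⟨hk2, hki⟩)
        ((PySem.Int.mod_eq_zero_iff_dvd i k).mpr hkd)
    · intro h k hk hm
      have := PySem.List.mem_pyRange_one.mp hk
      exact h k this.1 this.2 ((PySem.Int.mod_eq_zero_iff_dvd i k).mp hm)
  rw [hdvd, hcnt]; exact and_comm

theorem pv_trialGo_eq (n : Int) : ∀ (N : Nat) (i m : Int) (acc : List Int),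
    (m + 1 - i).toNat ≤ N → 2 ≤ i → 1 ≤ m → m ≤ n →
    (∀ p : Int, Prime p → 0 < p → p ∣ m → i ≤ p) →
    pvTrialGo n N i m acc = acc ++ (PySem.List.pyRange i n 1).filter (pvPF m) := by
  intro N
  induction N with
  | zero =>
    intro i m acc hN h2 h1 hmn hmin
    have hgt : m < i := by omega
    show acc = acc ++ _
    rw [List.filter_eq_nil_iff.mpr ?_, List.append_nil]
    intro x hx
    simp only [pvPF, decide_eq_true_eq, not_and]
    intro hxp hxd
    have hxi : i ≤ x := (PySem.List.mem_pyRange_one.mp hx).1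
    have : x ≤ m := Int.le_of_dvd (by omega) hxd
    omega
  | succ N ih =>
    intro i m acc hN h2 h1 hmn hmin
    by_cases hle : i ≤ m
    · by_cases hmod : PySem.Int.mod m i = 0
      · have hdvd : i ∣ m := (PySem.Int.mod_eq_zero_iff_dvd m i).mp hmod
        have hip : Prime i := pv_small_prime i m h2 hdvd h1 hmin
        set m' := pvDivOut i m.toNat m with hm'
        have hm'le : m' ≤ m := pvDivOut_le i m.toNat m
        have hm'1 : 1 ≤ m' := pvDivOut_pos i m.toNat m h1
        have hm'nd : ¬ i ∣ m' := pvDivOut_not_dvd i h2 m.toNat m h1 (le_refl _)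
        have hm'dvd : m' ∣ m := pvDivOut_dvd i m.toNat m
        have hmin' : ∀ p : Int, Prime p → 0 < p → p ∣ m' → i + 1 ≤ p := by
          intro p hp hppos hpd
          have hge := hmin p hp hppos (hpd.trans hm'dvd)
          have : p ≠ i := fun hc => hm'nd (hc ▸ hpd)
          omega
        have hfe : (PySem.List.pyRange (i+1) n 1).filter (pvPF m')
            = (PySem.List.pyRange (i+1) n 1).filter (pvPF m) := by
          apply List.filter_congr
          intro x hx
          have hxi : i + 1 ≤ x := (PySem.List.mem_pyRange_one.mp hx).1
          simp only [pvPF, decide_eq_decide]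
          constructor
          · exact fun ⟨hxp, hxd⟩ => ⟨hxp, hxd.trans hm'dvd⟩
          · rintro ⟨hxp, hxd⟩
            exact ⟨hxp, pvDivOut_dvd_of i x hip hxp (by omega) (by omega) m.toNat m hxd⟩
        have hrec := ih (i+1) m' (if i ≠ n then acc ++ [i] else acc)
          (by omega) (by omega) hm'1 (by omega) hmin'
        show (if i ≤ m then
                if PySem.Int.mod m i = 0 then
                  pvTrialGo n N (i + 1) (pvDivOut i m.toNat m) (if i ≠ n then acc ++ [i] else acc)
                else pvTrialGo n N (i + 1) m acc
              else acc) = _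
        rw [if_pos hle, if_pos hmod, ← hm', hrec, hfe]
        by_cases hin : i < n
        · rw [if_pos (by omega)]
          rw [PySem.List.pyRange_one_cons hin, List.filter_cons]
          have : pvPF m i = true := by simp [pvPF, hip, hdvd]
          rw [this, if_pos rfl]
          simp
        · have : i = n := by omega
          subst this
          rw [if_neg (by omega)]
          rw [PySem.List.pyRange_one_eq_nil (le_refl i), PySem.List.pyRange_one_eq_nil (by omega)]
      · have hnd : ¬ i ∣ m := fun hc => hmod ((PySem.Int.mod_eq_zero_iff_dvd m i).mpr hc)
        have hin : i < n := by
          rcases lt_or_eq_of_le (hle.trans hmn) with h | h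
          · exact h
          · exfalso; have : i = m := by omega
            exact hnd (this ▸ dvd_refl i)
        have hmin' : ∀ p : Int, Prime p → 0 < p → p ∣ m → i + 1 ≤ p := by
          intro p hp hppos hpd
          have := hmin p hp hppos hpd
          have : p ≠ i := fun hc => hnd (hc ▸ hpd)
          omega
        show (if i ≤ m then
                if PySem.Int.mod m i = 0 then
                  pvTrialGo n N (i + 1) (pvDivOut i m.toNat m) (if i ≠ n then acc ++ [i] else acc)
                else pvTrialGo n N (i + 1) m acc
              else acc) = _
        rw [if_pos hle, if_neg hmod]
        rw [ih (i+1) m acc (by omega) (by omega) h1 hmn hmin']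
        rw [PySem.List.pyRange_one_cons hin, List.filter_cons]
        have : pvPF m i = false := by simp [pvPF, hnd]
        rw [this]
        simp
    · show (if i ≤ m then
              if PySem.Int.mod m i = 0 then
                pvTrialGo n N (i + 1) (pvDivOut i m.toNat m) (if i ≠ n then acc ++ [i] else acc)
              else pvTrialGo n N (i + 1) m acc
            else acc) = _
      rw [if_neg hle]
      rw [List.filter_eq_nil_iff.mpr ?_, List.append_nil]
      intro x hx
      simp only [pvPF, decide_eq_true_eq, not_and]
      intro hxp hxd
      have hxi : i ≤ x := (PySem.List.mem_pyRange_one.mp hx).1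
      have : x ≤ m := Int.le_of_dvd (by omega) hxd
      omega

-- ===== VERDICT (by name: the statement is the Claim_ definition above) =====
theorem list_of_simple_multipliers2_spec : Claim_equal_list_of_simple_multipliers2 := by
  unfold Claim_equal_list_of_simple_multipliers2
  intro n _
  unfold Spec_list_of_simple_multipliers2
  unfold list_of_simple_multipliers2_alt
  by_cases h2 : 2 ≤ n
  · rw [pv_trialGo_eq n ((n + 1 - 2).toNat) 2 n [] (by omega) (by omega) (by omega) (by omega) ?_]
    · rw [List.nil_append]; exact pv_A_eq_filter n
    · intro p hp hppos _
      have : p ≠ 1 := hp.ne_one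
      omega
  · have hz : (n + 1 - 2).toNat = 0 := by omega
    rw [hz]
    show list_of_simple_multipliers2 n = []
    rw [pv_A_eq_filter n]
    rw [PySem.List.pyRange_one_eq_nil (by omega)]
    rfl
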